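-- pv_equiv track=rewrite | github.com/obabichev/acmp-py | acmp/dynamic/11.py | solution
-- ===== SOURCE A (Python) =====
-- def solution(k, n):
--     results = [1]
--     for i in range(1, n + 1):
--         current = 0
--         for j in range(max(0, i - k), i):
--             current += results[j]
--         results.append(current)
--     return results[n]
-- ===== SOURCE B (Python) =====
-- def solution(k, n):
--     # Sliding-window running sum: keep the sum of the last (up to) k terms
--     # instead of re-summing them for every i.  O(n) instead of O(n*k).
--     results = [1]
--     window = 1 if k >= 1 else 0
--     for i in range(1, n + 1):
--         current = window
--         results.append(current)
--         window += current - (results[i - k] if 1 <= k <= i else 0)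
--     return results[n]
-- ===== Notes on version B (the rewrite author's own statement) =====
-- stated objective: faster
-- what changed: Replaces the inner loop that re-sums the previous k terms at every step by a running window sum updated in O(1) (add the new term, drop the term that leaves the window).
import Mathlib
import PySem

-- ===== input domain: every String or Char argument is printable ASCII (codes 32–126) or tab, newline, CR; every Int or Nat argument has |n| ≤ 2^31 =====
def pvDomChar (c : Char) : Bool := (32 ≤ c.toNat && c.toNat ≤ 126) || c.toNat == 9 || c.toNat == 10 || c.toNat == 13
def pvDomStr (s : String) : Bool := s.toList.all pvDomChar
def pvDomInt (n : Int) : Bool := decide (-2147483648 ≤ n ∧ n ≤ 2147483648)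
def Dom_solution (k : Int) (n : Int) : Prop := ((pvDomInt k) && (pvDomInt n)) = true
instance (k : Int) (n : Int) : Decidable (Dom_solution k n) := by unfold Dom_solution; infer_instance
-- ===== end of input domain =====

-- B replaces A's inner O(k) re-summation by a running window sum updated in O(1) per step (faster, O(n) vs O(n*k)); same return value wherever A returns.

-- ===== PORT A =====
-- loop body of A: current = sum of results[max(0,i-k) .. i-1]; results.append(current)
def stepA (k : Int) (results : List Int) (i : Int) : List Int :=
  results ++ [(PySem.List.pyRange (max 0 (i - k)) i 1).foldl
                (fun c j => c + PySem.List.pyGetD results j 0) 0]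

def solution (k : Int) (n : Int) : Int :=
  PySem.List.pyGetD ((PySem.List.pyRange 1 (n + 1) 1).foldl (stepA k) [1]) n 0

-- ===== PORT B =====
-- loop body of B: current = window; results.append(current); window += current - (results[i-k] if 1 <= k <= i else 0)
def stepB (k : Int) (st : List Int × Int) (i : Int) : List Int × Int :=
  let current := st.2
  let results := st.1 ++ [current]
  (results, st.2 + current - (if 1 ≤ k ∧ k ≤ i then PySem.List.pyGetD results (i - k) 0 else 0))

def solution_alt (k : Int) (n : Int) : Int :=
  PySem.List.pyGetD
    ((PySem.List.pyRange 1 (n + 1) 1).foldl (stepB k) ([1], if 1 ≤ k then 1 else 0)).1 n 0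

-- ===== PRECONDITION & SPEC =====
-- Pre_ excludes only n ≤ -2, where A raises IndexError on results[n] (B raises there too).
def Pre_solution (k : Int) (n : Int) : Prop := -1 ≤ n
instance (k : Int) (n : Int) : Decidable (Pre_solution k n) := by unfold Pre_solution; infer_instance
def pvWitness_solution : Int × Int := (2, 5)

def Spec_solution (k : Int) (n : Int) (out : Int) : Prop := out = solution_alt k n
instance (k : Int) (n : Int) (out : Int) : Decidable (Spec_solution k n out) := by unfold Spec_solution; infer_instance

-- ===== CLAIM (what is proved, stated in full; the proofs are below) =====
def Claim_equal_solution : Prop := ∀ (k : Int) (n : Int), Dom_solution k n → Pre_solution k n → Spec_solution k n (solution k n)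

-- ===== LEMMAS AND PROOFS =====

-- sum of results[j] for j in range(a, b)
def wsum (R : List Int) (a b : Int) : Int :=
  ((PySem.List.pyRange a b 1).map (fun j => PySem.List.pyGetD R j 0)).sum

lemma innerA_eq_wsum (R : List Int) (a b : Int) :
    (PySem.List.pyRange a b 1).foldl (fun c j => c + PySem.List.pyGetD R j 0) 0
      = wsum R a b := by
  simpa [wsum] using PySem.List.foldl_add (PySem.List.pyRange a b 1)
    (fun j => PySem.List.pyGetD R j 0) 0

lemma pyGetD_append_lt (xs ys : List Int) (j : Int) (d : Int)
    (h0 : 0 ≤ j) (h : j < xs.length) :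
    PySem.List.pyGetD (xs ++ ys) j d = PySem.List.pyGetD xs j d := by
  rw [PySem.List.pyGetD_eq_getElem (xs ++ ys) d h0 (by simp; omega),
      PySem.List.pyGetD_eq_getElem xs d h0 h]
  rw [List.getElem_append_left (by omega)]

lemma pyGetD_append_len (xs : List Int) (x d : Int) :
    PySem.List.pyGetD (xs ++ [x]) (xs.length : Int) d = x := by
  rw [PySem.List.pyGetD_eq_getElem (xs ++ [x]) d (by positivity) (by simp)]
  simp

lemma wsum_congr (R R' : List Int) (a b : Int)
    (h : ∀ j, a ≤ j → j < b → PySem.List.pyGetD R' j 0 = PySem.List.pyGetD R j 0) :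
    wsum R' a b = wsum R a b := by
  unfold wsum
  congr 1
  refine List.map_congr_left ?_
  intro j hj
  rw [PySem.List.mem_pyRange_one] at hj
  exact h j hj.1 hj.2

-- the loop invariant: the two loops build the same list, of length m+1,
-- and B's window is the sum A's next inner loop would compute
lemma loop_inv (k : Int) (m : Nat) :
    (PySem.List.pyRange 1 ((m : Int) + 1) 1).foldl (stepB k) ([1], if 1 ≤ k then 1 else 0)
      = ((PySem.List.pyRange 1 ((m : Int) + 1) 1).foldl (stepA k) [1],
         wsum ((PySem.List.pyRange 1 ((m : Int) + 1) 1).foldl (stepA k) [1])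
           (max 0 ((m : Int) + 1 - k)) ((m : Int) + 1))
    ∧ ((PySem.List.pyRange 1 ((m : Int) + 1) 1).foldl (stepA k) [1]).length = m + 1 := by
  induction m with
  | zero =>
    have hnil : PySem.List.pyRange 1 (((0 : Nat) : Int) + 1) 1 = [] :=
      PySem.List.pyRange_one_eq_nil (by norm_num)
    rw [hnil]
    refine ⟨?_, by simp⟩
    simp only [List.foldl_nil, Nat.cast_zero, zero_add]
    refine Prod.ext rfl ?_
    simp only
    by_cases hk : 1 ≤ k
    · have hmax : max 0 (1 - k) = 0 := by omega
      have h01 : PySem.List.pyRange 0 1 1 = [0] := by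
        have := PySem.List.pyRange_one_singleton 0
        norm_num at this
        exact this
      rw [if_pos hk, hmax]
      unfold wsum
      rw [h01]
      simp [PySem.List.pyGetD_zero_cons]
    · have hle : (1 : Int) ≤ max 0 (1 - k) := by omega
      rw [if_neg hk]
      unfold wsum
      rw [PySem.List.pyRange_one_eq_nil hle]
      simp
  | succ m ih =>
    have hc : ((m + 1 : Nat) : Int) = (m : Int) + 1 := by push_cast; ring
    rw [hc]
    set i : Int := (m : Int) + 1 with hi
    have hsplit : PySem.List.pyRange 1 (i + 1) 1
        = PySem.List.pyRange 1 i 1 ++ [i] :=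
      PySem.List.pyRange_one_succ_right (by omega)
    set R := (PySem.List.pyRange 1 i 1).foldl (stepA k) [1] with hR
    obtain ⟨hB, hlen⟩ := ih
    have hi1 : 1 ≤ i := by omega
    have hRlen : (R.length : Int) = i := by rw [hlen]; push_cast; omega
    have hcur : (PySem.List.pyRange (max 0 (i - k)) i 1).foldl
        (fun c j => c + PySem.List.pyGetD R j 0) 0 = wsum R (max 0 (i - k)) i :=
      innerA_eq_wsum R _ _
    set w := wsum R (max 0 (i - k)) i with hw
    have hstepA : (PySem.List.pyRange 1 (i + 1) 1).foldl (stepA k) [1] = R ++ [w] := by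
      rw [hsplit, List.foldl_append, ← hR]
      simp only [List.foldl_cons, List.foldl_nil, stepA, hcur]
    have hagree : ∀ j : Int, 0 ≤ j → j < i →
        PySem.List.pyGetD (R ++ [w]) j 0 = PySem.List.pyGetD R j 0 := by
      intro j h0 hj
      exact pyGetD_append_lt R [w] j 0 h0 (by omega)
    have htop : PySem.List.pyGetD (R ++ [w]) i 0 = w := by
      have := pyGetD_append_len R w 0
      rwa [hRlen] at this
    refine ⟨?_, by rw [hstepA]; simp [hlen]⟩
    rw [hstepA, hsplit, List.foldl_append, hB]
    simp only [List.foldl_cons, List.foldl_nil, stepB]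
    refine Prod.ext rfl ?_
    simp only
    by_cases hk : 1 ≤ k
    · have hlo : max 0 (i + 1 - k) ≤ i := by omega
      have hsplit2 : PySem.List.pyRange (max 0 (i + 1 - k)) (i + 1) 1
          = PySem.List.pyRange (max 0 (i + 1 - k)) i 1 ++ [i] :=
        PySem.List.pyRange_one_succ_right hlo
      have hws : wsum (R ++ [w]) (max 0 (i + 1 - k)) (i + 1)
          = wsum (R ++ [w]) (max 0 (i + 1 - k)) i + w := by
        unfold wsum; rw [hsplit2]; simp [htop]
      have hws2 : wsum (R ++ [w]) (max 0 (i + 1 - k)) i = wsum R (max 0 (i + 1 - k)) i :=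
        wsum_congr R (R ++ [w]) _ i (fun j h1 h2 => hagree j (by omega) h2)
      by_cases hki : k ≤ i
      · -- window slides: drop results[i-k]
        have hmax1 : max 0 (i + 1 - k) = i + 1 - k := by omega
        have hmax0 : max 0 (i - k) = i - k := by omega
        have hcons : PySem.List.pyRange (i - k) i 1
            = (i - k) :: PySem.List.pyRange (i - k + 1) i 1 :=
          PySem.List.pyRange_one_cons (by omega)
        have hwold : w = PySem.List.pyGetD R (i - k) 0 + wsum R (i + 1 - k) i := by
          rw [hw, hmax0]
          unfold wsum
          rw [hcons]
          simp [show i - k + 1 = i + 1 - k by ring]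
        have hgetd : PySem.List.pyGetD (R ++ [w]) (i - k) 0
            = PySem.List.pyGetD R (i - k) 0 :=
          hagree (i - k) (by omega) (by omega)
        rw [if_pos ⟨hk, hki⟩, hws, hws2, hmax1, hgetd]
        rw [hwold]
        ring
      · -- window not yet full: nothing leaves
        have hmax1 : max 0 (i + 1 - k) = 0 := by omega
        have hmax0 : max 0 (i - k) = 0 := by omega
        rw [if_neg (by tauto), hws, hws2, hmax1]
        rw [hw, hmax0]
        ring
    · -- k ≤ 0: both windows are empty sums
      have h1 : (i + 1 : Int) ≤ max 0 (i + 1 - k) := by omega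
      have h0 : (i : Int) ≤ max 0 (i - k) := by omega
      rw [if_neg (by tauto)]
      rw [hw]
      unfold wsum
      rw [PySem.List.pyRange_one_eq_nil h1, PySem.List.pyRange_one_eq_nil h0]
      simp

-- ===== VERDICT (by name: the statement is the Claim_ definition above) =====
theorem solution_spec : Claim_equal_solution := by
  intro k n _ hpre
  unfold Spec_solution solution solution_alt
  by_cases hn : 0 ≤ n
  · obtain ⟨m, hm⟩ : ∃ m : Nat, n = (m : Int) := ⟨n.toNat, by omega⟩
    subst hm
    rw [(loop_inv k m).1]
  · have hneg : n = -1 := by unfold Pre_solution at hpre; omega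
    subst hneg
    rw [show (-1 : Int) + 1 = 0 by ring, PySem.List.pyRange_one_eq_nil (by norm_num)]
    simp
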